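-- pv_equiv track=rewrite | github.com/chanminmun/algorithm | week7/week7-2.py | solution
-- ===== SOURCE A (Python) =====
-- def solution(str_list):
--     answer = []
--     for i in range(len(str_list)):
--         if str_list[i] == "l":
--             answer += str_list[:i]
--             break
--         if str_list[i] == "r":
--             answer += str_list[i + 1:]
--             break
--         else:
--             answer = []
--
--     return answer
-- ===== SOURCE B (Python) =====
-- def solution(str_list):
--     try:
--         li = str_list.index("l")
--     except ValueError:
--         li = None
--     try:
--         ri = str_list.index("r")
--     except ValueError:
--         ri = None
--     if li is None and ri is None:
--         return []
--     if ri is None or (li is not None and li < ri):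
--         return str_list[:li]
--     return str_list[ri + 1:]
-- ===== Notes on version B (the rewrite author's own statement) =====
-- stated objective: alternative
-- what changed: Replaces the single interleaved scan-with-break by two independent first-occurrence lookups (list.index for 'l' and for 'r') followed by a position comparison that picks prefix or suffix.
import Mathlib
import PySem

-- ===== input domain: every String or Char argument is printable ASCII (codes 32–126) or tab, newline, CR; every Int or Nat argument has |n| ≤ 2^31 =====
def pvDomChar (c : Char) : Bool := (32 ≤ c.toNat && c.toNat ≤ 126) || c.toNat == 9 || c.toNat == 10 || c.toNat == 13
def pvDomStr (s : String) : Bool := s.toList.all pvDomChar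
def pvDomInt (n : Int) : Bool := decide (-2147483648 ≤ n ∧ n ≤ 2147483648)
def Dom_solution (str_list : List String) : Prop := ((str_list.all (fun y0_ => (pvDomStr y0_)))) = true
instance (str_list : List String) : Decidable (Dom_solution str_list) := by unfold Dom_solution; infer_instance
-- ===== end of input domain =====

-- B replaces A's single scan-with-break by two independent list.index lookups plus a position comparison (alternative decomposition, same cost).

-- ===== PORT A =====
-- the for-loop over range(len(str_list)) with break, carrying the running index i and 'answer'
def solutionGo (orig : List String) : List String → Nat → List String → List String
  | [], _, answer => answer
  | x :: rest, i, answer =>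
    if x = "l" then answer ++ PySem.List.slice orig none (some (i : Int))
    else if x = "r" then answer ++ PySem.List.slice orig (some ((i : Int) + 1)) none
    else solutionGo orig rest (i + 1) []

def solution (str_list : List String) : List String :=
  solutionGo str_list str_list 0 []

-- ===== PORT B =====
def solution_alt (str_list : List String) : List String :=
  match PySem.List.index? str_list "l", PySem.List.index? str_list "r" with
  | none, none => []
  | some li, none => PySem.List.slice str_list none (some (li : Int))
  | none, some ri => PySem.List.slice str_list (some ((ri : Int) + 1)) none
  | some li, some ri =>
    if li < ri then PySem.List.slice str_list none (some (li : Int))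
    else PySem.List.slice str_list (some ((ri : Int) + 1)) none

-- ===== PRECONDITION & SPEC =====
def Spec_solution (str_list : List String) (out : List String) : Prop := out = solution_alt str_list
instance (str_list : List String) (out : List String) : Decidable (Spec_solution str_list out) := by unfold Spec_solution; infer_instance

-- ===== CLAIM (what is proved, stated in full; the proofs are below) =====
def Claim_equal_solution : Prop := ∀ (str_list : List String), Dom_solution str_list → Spec_solution str_list (solution str_list)

-- ===== LEMMAS AND PROOFS =====

lemma solutionGo_spec (orig : List String) :
    ∀ (rest : List String) (i : Nat),
    solutionGo orig rest i [] =
      match PySem.List.index? rest "l", PySem.List.index? rest "r" with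
      | none, none => []
      | some li, none => PySem.List.slice orig none (some ((i + li : Nat) : Int))
      | none, some ri => PySem.List.slice orig (some (((i + ri : Nat) : Int) + 1)) none
      | some li, some ri =>
        if li < ri then PySem.List.slice orig none (some ((i + li : Nat) : Int))
        else PySem.List.slice orig (some (((i + ri : Nat) : Int) + 1)) none := by
  intro rest
  induction rest with
  | nil => intro i; simp [solutionGo, PySem.List.index?]
  | cons x rest ih =>
    intro i
    by_cases hl : x = "l"
    · subst hl
      have hr : PySem.List.index? ("l" :: rest) "r" = (PySem.List.index? rest "r").map (· + 1) :=
        PySem.List.index?_cons_of_ne rest (by decide)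
      rw [PySem.List.index?_cons_self, hr]
      cases hcr : PySem.List.index? rest "r" with
      | none => simp [solutionGo]
      | some r => simp [solutionGo]
    · by_cases hrx : x = "r"
      · subst hrx
        have hl' : PySem.List.index? ("r" :: rest) "l" = (PySem.List.index? rest "l").map (· + 1) :=
          PySem.List.index?_cons_of_ne rest (by decide)
        rw [PySem.List.index?_cons_self, hl']
        cases hcl : PySem.List.index? rest "l" with
        | none => simp [solutionGo]
        | some l => simp [solutionGo]
      · have hl' : PySem.List.index? (x :: rest) "l" = (PySem.List.index? rest "l").map (· + 1) :=
          PySem.List.index?_cons_of_ne rest hl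
        have hr' : PySem.List.index? (x :: rest) "r" = (PySem.List.index? rest "r").map (· + 1) :=
          PySem.List.index?_cons_of_ne rest hrx
        simp only [solutionGo, if_neg hl, if_neg hrx, hl', hr', ih (i + 1)]
        cases PySem.List.index? rest "l" with
        | none =>
          cases PySem.List.index? rest "r" with
          | none => simp
          | some r => simp [Option.map]; congr 2; omega
        | some l =>
          cases PySem.List.index? rest "r" with
          | none => simp [Option.map]; congr 2; omega
          | some r =>
            simp [Option.map]
            split_ifs <;> congr 2 <;> omega

-- ===== VERDICT (by name: the statement is the Claim_ definition above) =====
theorem solution_spec : Claim_equal_solution := by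
  intro str_list _
  unfold Spec_solution solution solution_alt
  rw [solutionGo_spec]
  cases PySem.List.index? str_list "l" <;> cases PySem.List.index? str_list "r" <;> simp
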